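-- pv_equiv track=rewrite | github.com/adsabs/adsabs | adsabs/core/template_filters.py | format_complex_ads_facet_str
-- ===== SOURCE A (Python) =====
-- def format_ads_facet_str(value):
--     """
--     Returns a string to be shown as a facet
--     """
--     try:
--         split_str = value.split('/')
--         int(split_str[0])
--     except ValueError:
--         return value
--     if len(split_str) == 1:
--         return value
--     return split_str[-1]
--
-- def format_complex_ads_facet_str(value):
--     """
--     Returns a string that can be used as human readable facet
--     """
--     if not value.startswith('-'):
--         value = value.strip('()[]')
--     ret_value = []
--     tmp_quoted_str = []
--     quoted_section = False
--     for char in value: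
--         if char != '"' and not quoted_section:
--             ret_value.append(char)
--         elif char != '"' and quoted_section:
--             tmp_quoted_str.append(char)
--         elif char == '"' and not quoted_section:
--             quoted_section = True
--             ret_value.append(char)
--         elif char == '"' and quoted_section:
--             quoted_section = False
--             ret_value = ret_value + list(format_ads_facet_str(''.join(tmp_quoted_str)))
--             ret_value.append(char)
--             tmp_quoted_str = []
--     return ''.join(ret_value)
-- ===== SOURCE B (Python) =====
-- def format_ads_facet_str(value):
--     """
--     Returns a string to be shown as a facet
--     """
--     try:
--         split_str = value.split('/')
--         int(split_str[0])
--     except ValueError: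
--         return value
--     if len(split_str) == 1:
--         return value
--     return split_str[-1]
--
-- def format_complex_ads_facet_str(value):
--     """
--     Returns a string that can be used as human readable facet
--     """
--     if not value.startswith('-'):
--         value = value.strip('()[]')
--     parts = value.split('"')
--     out = []
--     for i, part in enumerate(parts):
--         if i % 2 == 0:
--             out.append(part)
--         elif i == len(parts) - 1:
--             out.append('')
--         else:
--             out.append(format_ads_facet_str(part))
--     return '"'.join(out)
-- ===== Notes on version B (the rewrite author's own statement) =====
-- stated objective: faster
-- what changed: Replaces A's per-character quoted-state machine (explicit ret/tmp/quoted accumulators) by splitting the string once on the double-quote character, formatting the odd-indexed (inside-quote) parts with format_ads_facet_str (emitting an empty part for a trailing unterminated quoted section), and joining the parts back with double quotes.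
import Mathlib
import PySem

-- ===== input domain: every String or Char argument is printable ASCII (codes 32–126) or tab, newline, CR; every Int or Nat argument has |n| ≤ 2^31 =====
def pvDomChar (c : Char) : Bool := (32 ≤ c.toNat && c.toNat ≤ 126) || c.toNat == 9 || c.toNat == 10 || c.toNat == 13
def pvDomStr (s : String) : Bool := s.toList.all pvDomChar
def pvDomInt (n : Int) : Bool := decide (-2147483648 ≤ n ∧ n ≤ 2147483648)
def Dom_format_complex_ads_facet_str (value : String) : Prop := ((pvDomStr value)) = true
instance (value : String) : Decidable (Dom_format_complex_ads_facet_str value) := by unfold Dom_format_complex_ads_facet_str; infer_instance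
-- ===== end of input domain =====

-- B replaces A's per-character state machine by split-on-'"' / format-odd-parts / join (idiomatic; measurably faster in CPython via C-level split/join).

-- shared module helper (same in Source A and Source B); list indices 0 and -1 are read with
-- a default: value.split('/') is never empty, so Python's [0]/[-1] cannot raise here
def format_ads_facet_str (value : String) : String :=
  let split_str := PySem.Chars.splitOn value.toList ['/']
  match PySem.Int.ofChars? (PySem.List.pyGetD split_str 0 []) with
  | none => value
  | some _ =>
    if split_str.length = 1 then value
    else String.ofList (PySem.List.pyGetD split_str (-1) [])

-- ===== PORT A =====
def format_complex_ads_facet_str (value : String) : String :=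
  let value := if !(PySem.Str.startswith value "-") then PySem.Str.stripChars value "()[]" else value
  let st := value.toList.foldl
    (fun (st : List Char × List Char × Bool) char =>
      let (ret, tmp, q) := st
      if char != '"' && !q then (ret ++ [char], tmp, q)
      else if char != '"' && q then (ret, tmp ++ [char], q)
      else if char == '"' && !q then (ret ++ [char], tmp, true)
      else (ret ++ (format_ads_facet_str (String.ofList tmp)).toList ++ [char], [], false))
    ([], [], false)
  String.ofList st.1

-- ===== PORT B =====
def format_complex_ads_facet_str_alt (value : String) : String :=
  let value := if !(PySem.Str.startswith value "-") then PySem.Str.stripChars value "()[]" else value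
  let parts := (PySem.Str.split? value "\"").getD []   -- sep is "\"" ≠ "", so split? is always some
  let out := (PySem.List.enumerate parts).foldl
    (fun (acc : List String) (ip : Int × String) =>
      if PySem.Int.mod ip.1 2 == 0 then acc ++ [ip.2]
      else if ip.1 == (parts.length : Int) - 1 then acc ++ [""]
      else acc ++ [format_ads_facet_str ip.2])
    []
  PySem.Str.join "\"" out

-- ===== PRECONDITION & SPEC =====
def Spec_format_complex_ads_facet_str (value : String) (out : String) : Prop := out = format_complex_ads_facet_str_alt value
instance (value : String) (out : String) : Decidable (Spec_format_complex_ads_facet_str value out) := by unfold Spec_format_complex_ads_facet_str; infer_instance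

-- ===== CLAIM (what is proved, stated in full; the proofs are below) =====
def Claim_equal_format_complex_ads_facet_str : Prop := ∀ (value : String), Dom_format_complex_ads_facet_str value → Spec_format_complex_ads_facet_str value (format_complex_ads_facet_str value)

-- ===== LEMMAS AND PROOFS =====

-- structural reformulation of splitOn on the single-char separator '"'
def mySplit : List Char → List (List Char)
  | [] => [[]]
  | c :: r => if c = '"' then [] :: mySplit r
              else (c :: (mySplit r).headD []) :: (mySplit r).tail

lemma mySplit_ne_nil (cs : List Char) : mySplit cs ≠ [] := by
  cases cs with
  | nil => simp [mySplit]
  | cons c r => by_cases h : c = '"' <;> simp [mySplit, h]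

lemma go_spec (cs : List Char) : ∀ (fuel : Nat) (cur : List Char) (acc : List (List Char)),
    cs.length < fuel →
    PySem.Chars.splitOn.go ['"'] fuel cs cur acc
      = acc.reverse ++ (cur.reverse ++ (mySplit cs).headD []) :: (mySplit cs).tail := by
  induction cs with
  | nil =>
    intro fuel cur acc h
    cases fuel with
    | zero => omega
    | succ f => rw [PySem.Chars.splitOn.go.eq_def]; simp [mySplit]
  | cons c r ih =>
    intro fuel cur acc h
    cases fuel with
    | zero => omega
    | succ f =>
      rw [PySem.Chars.splitOn.go.eq_def]
      simp only [List.isPrefixOf, List.length_nil, List.length_cons, List.drop_succ_cons,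
        List.drop_zero]
      by_cases hc : c = '"'
      · subst hc
        rw [if_pos (by simp)]
        rw [ih f [] (cur.reverse :: acc) (by simpa using h)]
        rcases hr : mySplit r with _ | ⟨p, ps⟩
        · exact absurd hr (mySplit_ne_nil r)
        · simp [mySplit, hr]
      · rw [if_neg (by simp; exact fun he => hc he.symm)]
        rw [ih f (c :: cur) acc (by simpa using h)]
        simp [mySplit, hc]

lemma splitOn_eq (cs : List Char) : PySem.Chars.splitOn cs ['"'] = mySplit cs := by
  unfold PySem.Chars.splitOn
  rw [go_spec cs (cs.length + 1) [] [] (by omega)]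
  rcases hr : mySplit cs with _ | ⟨p, ps⟩
  · exact absurd hr (mySplit_ne_nil cs)
  · simp

-- A's quoted-state scanner, written structurally
def fmtChars (cs : List Char) : List Char := (format_ads_facet_str (String.ofList cs)).toList

def fg : Bool → List Char → List Char → List Char
  | _, _, [] => []
  | false, tmp, c :: r => if c = '"' then '"' :: fg true tmp r else c :: fg false tmp r
  | true, tmp, c :: r => if c = '"' then fmtChars tmp ++ '"' :: fg false [] r
                         else fg true (tmp ++ [c]) r

-- B's odd/even part processing, written structurally (char level and string level)
def bOutC : Bool → List (List Char) → List (List Char)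
  | _, [] => []
  | true, p :: ps => p :: bOutC false ps
  | false, p :: ps => (if ps = [] then [] else fmtChars p) :: bOutC true ps

def bOutS : Bool → List String → List String
  | _, [] => []
  | true, p :: ps => p :: bOutS false ps
  | false, p :: ps => (if ps = [] then "" else format_ads_facet_str p) :: bOutS true ps

lemma join_two (a b : List Char) (as : List (List Char)) :
    PySem.Chars.join ['"'] (a :: b :: as) = a ++ '"' :: PySem.Chars.join ['"'] (b :: as) := by
  cases as <;> simp [PySem.Chars.join, List.intercalate, List.intersperse]

lemma if_tt {α : Type} (a b : α) : (if true = true then a else b) = a := rfl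
lemma if_ff {α : Type} (a b : α) : (if false = true then a else b) = b := rfl

-- what the scanner produces, phrased on the parts of the split
def j : Bool → List Char → List (List Char) → List Char
  | _, _, [] => []
  | false, tmp, p :: ps => if ps.isEmpty then p else p ++ '"' :: j true tmp ps
  | true, tmp, p :: ps => if ps.isEmpty then [] else fmtChars (tmp ++ p) ++ '"' :: j false [] ps

lemma fg_split (cs : List Char) : ∀ (q : Bool) (tmp : List Char),
    fg q tmp cs = j q tmp (mySplit cs) := by
  induction cs with
  | nil => intro q tmp; cases q <;> rfl
  | cons c r ih =>
    intro q tmp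
    rcases hr : mySplit r with _ | ⟨p, ps⟩
    · exact absurd hr (mySplit_ne_nil r)
    cases q
    · by_cases hc : c = '"'
      · subst hc
        rw [show fg false tmp ('"' :: r) = '"' :: fg true tmp r from by simp [fg],
          ih true tmp, hr,
          show mySplit ('"' :: r) = [] :: mySplit r from by simp [mySplit], hr]
        simp [j]
      · rw [show fg false tmp (c :: r) = c :: fg false tmp r from by simp [fg, hc],
          ih false tmp, hr,
          show mySplit (c :: r) = (c :: p) :: ps from by simp [mySplit, hc, hr]]
        rcases ps with _ | ⟨p2, ps2⟩ <;> simp [j]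
    · by_cases hc : c = '"'
      · subst hc
        rw [show fg true tmp ('"' :: r) = fmtChars tmp ++ '"' :: fg false [] r from by simp [fg],
          ih false [], hr,
          show mySplit ('"' :: r) = [] :: mySplit r from by simp [mySplit], hr]
        simp [j]
      · rw [show fg true tmp (c :: r) = fg true (tmp ++ [c]) r from by simp [fg, hc],
          ih true (tmp ++ [c]), hr,
          show mySplit (c :: r) = (c :: p) :: ps from by simp [mySplit, hc, hr]]
        rcases ps with _ | ⟨p2, ps2⟩ <;> simp [j]

lemma j_join (parts : List (List Char)) :
    j false [] parts = PySem.Chars.join ['"'] (bOutC true parts) ∧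
    (parts ≠ [] → j true [] parts = PySem.Chars.join ['"'] (bOutC false parts)) := by
  induction parts with
  | nil => exact ⟨rfl, fun h => absurd rfl h⟩
  | cons p ps ih =>
    constructor
    · rcases ps with _ | ⟨q, qs⟩
      · simp [j, bOutC, PySem.Chars.join, List.intercalate, List.intersperse]
      · rw [show j false [] (p :: q :: qs) = p ++ '"' :: j true [] (q :: qs) from by
            simp [j, List.isEmpty],
          ih.2 (by simp),
          show bOutC true (p :: q :: qs) = p :: bOutC false (q :: qs) from rfl,
          show bOutC false (q :: qs) = (if qs = [] then [] else fmtChars q) :: bOutC true qs from by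
            simp [bOutC], join_two]
    · intro _
      rcases ps with _ | ⟨q, qs⟩
      · simp [j, bOutC, PySem.Chars.join, List.intercalate, List.intersperse]
      · rw [show j true [] (p :: q :: qs) = fmtChars ([] ++ p) ++ '"' :: j false [] (q :: qs) from by
            simp [j, List.isEmpty],
          ih.1,
          show bOutC false (p :: q :: qs) = fmtChars p :: bOutC true (q :: qs) from by simp [bOutC],
          show bOutC true (q :: qs) = q :: bOutC false qs from rfl, join_two]
        simp

-- A's foldl unrolls to fg
def stepA (st : List Char × List Char × Bool) (char : Char) : List Char × List Char × Bool :=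
  let (ret, tmp, q) := st
  if char != '"' && !q then (ret ++ [char], tmp, q)
  else if char != '"' && q then (ret, tmp ++ [char], q)
  else if char == '"' && !q then (ret ++ [char], tmp, true)
  else (ret ++ (format_ads_facet_str (String.ofList tmp)).toList ++ [char], [], false)

lemma foldA_key (cs : List Char) : ∀ (ret tmp : List Char) (q : Bool),
    (cs.foldl stepA (ret, tmp, q)).1 = ret ++ fg q tmp cs := by
  induction cs with
  | nil => intro ret tmp q; simp [fg]
  | cons c r ih =>
    intro ret tmp q
    rw [List.foldl_cons]
    by_cases hc : c = '"'
    · subst hc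
      cases q
      · rw [show stepA (ret, tmp, false) '"' = (ret ++ ['"'], tmp, true) from by simp [stepA], ih]
        simp [fg]
      · rw [show stepA (ret, tmp, true) '"'
            = (ret ++ (format_ads_facet_str (String.ofList tmp)).toList ++ ['"'], [], false) from by
            simp [stepA], ih]
        simp [fg, fmtChars]
    · cases q
      · rw [show stepA (ret, tmp, false) c = (ret ++ [c], tmp, false) from by simp [stepA, hc], ih]
        simp [fg, hc]
      · rw [show stepA (ret, tmp, true) c = (ret, tmp ++ [c], true) from by simp [stepA, hc], ih]
        simp [fg, hc]

lemma foldA (cs : List Char) (ret tmp : List Char) (q : Bool) :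
    (cs.foldl
      (fun (st : List Char × List Char × Bool) char =>
        let (ret, tmp, q) := st
        if char != '"' && !q then (ret ++ [char], tmp, q)
        else if char != '"' && q then (ret, tmp ++ [char], q)
        else if char == '"' && !q then (ret ++ [char], tmp, true)
        else (ret ++ (format_ads_facet_str (String.ofList tmp)).toList ++ [char], [], false))
      (ret, tmp, q)).1 = ret ++ fg q tmp cs :=
  foldA_key cs ret tmp q

-- B's foldl over enumerate unrolls to bOutS
lemma foldB (n : Int) (ps : List String) : ∀ (i0 : Int) (acc : List String),
    0 ≤ i0 → i0 + ps.length = n →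
    ((PySem.List.enumerate ps i0).foldl
      (fun (acc : List String) (ip : Int × String) =>
        if PySem.Int.mod ip.1 2 == 0 then acc ++ [ip.2]
        else if ip.1 == n - 1 then acc ++ [""]
        else acc ++ [format_ads_facet_str ip.2])
      acc)
    = acc ++ bOutS (PySem.Int.mod i0 2 == 0) ps := by
  induction ps with
  | nil => intro i0 acc _ _; simp [PySem.List.enumerate_nil, bOutS]
  | cons p ps ih =>
    intro i0 acc h0 hn
    simp only [List.length_cons] at hn
    push_cast at hn
    rw [PySem.List.enumerate_cons, List.foldl_cons,
      ih (i0 + 1) _ (by omega) (by push_cast; omega)]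
    have hm : PySem.Int.mod i0 2 = i0 % 2 := PySem.Int.mod_eq_emod_of_pos (by omega)
    have hm1 : PySem.Int.mod (i0 + 1) 2 = (i0 + 1) % 2 := PySem.Int.mod_eq_emod_of_pos (by omega)
    by_cases he : i0 % 2 = 0
    · have hb : (PySem.Int.mod i0 2 == 0) = true := by rw [hm, he]; rfl
      have h1 : (PySem.Int.mod (i0 + 1) 2 == 0) = false := by rw [hm1]; simp; omega
      simp only [hb, h1, if_tt, bOutS]
      simp
    · have hb : (PySem.Int.mod i0 2 == 0) = false := by rw [hm]; simp [he]
      have h1 : (PySem.Int.mod (i0 + 1) 2 == 0) = true := by rw [hm1]; simp; omega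
      rcases hl : ps with _ | ⟨p2, ps2⟩
      · have hlast : (i0 == n - 1) = true := by subst hl; simp at hn ⊢; omega
        simp only [hb, h1, hlast, if_tt, if_ff, bOutS]
        simp [bOutS]
      · have hlast : (i0 == n - 1) = false := by
          subst hl; simp only [List.length_cons] at hn; push_cast at hn; simp; omega
        simp only [hb, h1, hlast, if_tt, if_ff, bOutS]
        simp [bOutS]

lemma bOutS_map (ps : List (List Char)) : ∀ (b : Bool),
    (bOutS b (ps.map String.ofList)).map String.toList = bOutC b ps := by
  induction ps with
  | nil => intro b; cases b <;> simp [bOutS, bOutC]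
  | cons p ps ih =>
    intro b
    cases b
    · by_cases h : ps = [] <;>
        simp [bOutS, bOutC, h, ih, fmtChars]
    · simp [bOutS, bOutC, ih]

-- ===== VERDICT (by name: the statement is the Claim_ definition above) =====
theorem format_complex_ads_facet_str_spec : Claim_equal_format_complex_ads_facet_str := by
  unfold Claim_equal_format_complex_ads_facet_str Spec_format_complex_ads_facet_str
  intro value _
  have hA : format_complex_ads_facet_str value
      = String.ofList (((if !(PySem.Str.startswith value "-") then
            PySem.Str.stripChars value "()[]" else value).toList.foldl
          (fun (st : List Char × List Char × Bool) char =>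
            let (ret, tmp, q) := st
            if char != '"' && !q then (ret ++ [char], tmp, q)
            else if char != '"' && q then (ret, tmp ++ [char], q)
            else if char == '"' && !q then (ret ++ [char], tmp, true)
            else (ret ++ (format_ads_facet_str (String.ofList tmp)).toList ++ [char], [], false))
          ([], [], false)).1) := rfl
  have hB : format_complex_ads_facet_str_alt value
      = PySem.Str.join "\""
          ((PySem.List.enumerate ((PySem.Str.split? (if !(PySem.Str.startswith value "-") then
              PySem.Str.stripChars value "()[]" else value) "\"").getD [])).foldl
            (fun (acc : List String) (ip : Int × String) =>
              if PySem.Int.mod ip.1 2 == 0 then acc ++ [ip.2]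
              else if ip.1 == (((PySem.Str.split? (if !(PySem.Str.startswith value "-") then
                    PySem.Str.stripChars value "()[]" else value) "\"").getD []).length : Int) - 1
                then acc ++ [""]
              else acc ++ [format_ads_facet_str ip.2])
            []) := rfl
  rw [hA, hB]
  set v := if !(PySem.Str.startswith value "-") then PySem.Str.stripChars value "()[]" else value
    with hv
  have hp : (PySem.Str.split? v "\"").getD []
      = (PySem.Chars.splitOn v.toList ['"']).map String.ofList := by
    simp only [PySem.Str.split?]
    rw [show ("\"" : String).toList = ['"'] from by decide,
      show PySem.Chars.split? v.toList ['"'] = some (PySem.Chars.splitOn v.toList ['"']) from rfl]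
    rfl
  rw [foldA v.toList [] [] false, List.nil_append, fg_split v.toList false [],
    (j_join (mySplit v.toList)).1]
  rw [hp]
  rw [foldB (((PySem.Chars.splitOn v.toList ['"']).map String.ofList).length : Int)
      ((PySem.Chars.splitOn v.toList ['"']).map String.ofList) 0 [] (by omega) (by push_cast; ring),
    show (PySem.Int.mod 0 2 == 0) = true from rfl, List.nil_append]
  simp only [PySem.Str.join]
  rw [show ("\"" : String).toList = ['"'] from by decide, splitOn_eq, bOutS_map]
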